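-- pv_equiv track=rewrite | github.com/VPAMINICCAM/vpa_demo | scripts/visual/search_pattern.py | _break_segs
-- ===== SOURCE A (Python) =====
-- def _break_segs(numbers:list,max_gap=5):
--
--     segements = {}
--
--     segement_number = 0
--     current_segement = []
--
--     for index,i in enumerate(numbers):
--
--         if not current_segement:
--             current_segement.append(i)
--         else:
--             if i <= numbers[index-1] + max_gap:
--                 # IN
--                 current_segement.append(i)
--             else:
--                 if len(current_segement) > 3:
--                     segements[segement_number] = current_segement
--                     segement_number += 1
--                 current_segement = [i]
--
--     if len(current_segement) > 3:
--         segements[segement_number] = current_segement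
--
--     return segements
-- ===== SOURCE B (Python) =====
-- def _break_segs(numbers: list, max_gap=5):
--     # stage 1: compute all run boundaries (indices where a gap breaks the run)
--     n = len(numbers)
--     cuts = [0] + [i for i in range(1, n) if numbers[i] > numbers[i - 1] + max_gap] + [n]
--     # stage 2: slice out the segments between consecutive boundaries, keep the
--     # long ones (> 3 elements) and number them 0,1,2,...
--     segs = [numbers[a:b] for a, b in zip(cuts, cuts[1:]) if b - a > 3]
--     return dict(enumerate(segs))
-- ===== Notes on version B (the rewrite author's own statement) =====
-- stated objective: alternative
-- what changed: B replaces A's single-pass accumulator-and-counter loop by an index-based two-stage algorithm: it first computes the list of run boundaries (0, every index i with numbers[i] > numbers[i-1] + max_gap, and n), then slices the input between consecutive boundaries, keeping and enumerating the slices longer than 3.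
import Mathlib
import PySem

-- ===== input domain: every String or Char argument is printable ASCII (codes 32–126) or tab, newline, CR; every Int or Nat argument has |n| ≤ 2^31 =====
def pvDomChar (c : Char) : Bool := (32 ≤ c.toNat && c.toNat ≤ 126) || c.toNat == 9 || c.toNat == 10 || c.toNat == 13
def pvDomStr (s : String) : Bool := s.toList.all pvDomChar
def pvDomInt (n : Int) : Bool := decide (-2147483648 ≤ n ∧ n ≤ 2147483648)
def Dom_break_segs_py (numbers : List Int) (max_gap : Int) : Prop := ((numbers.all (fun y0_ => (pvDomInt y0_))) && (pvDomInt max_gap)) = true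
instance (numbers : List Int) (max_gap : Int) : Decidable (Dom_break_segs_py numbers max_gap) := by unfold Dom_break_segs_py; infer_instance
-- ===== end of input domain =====

-- B replaces A's accumulator loop by a two-stage boundary-index algorithm (compute all
-- cut indices, then slice between consecutive cuts); same O(n) cost, no speed claim.

-- ===== PORT A =====
-- loop body of A; numbers[index-1] is ported as pyGet? … ; the .getD 0 never fires, since the
-- lookup is only reached when cur ≠ [], i.e. index ≥ 1, where index-1 is in range
def breakStepA (numbers : List Int) (max_gap : Int)
    (st : PySem.Dict Int (List Int) × Int × List Int) (p : Int × Int) :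
    PySem.Dict Int (List Int) × Int × List Int :=
  let (segs, n, cur) := st
  if cur = [] then (segs, n, cur ++ [p.2])
  else if p.2 ≤ (PySem.List.pyGet? numbers (p.1 - 1)).getD 0 + max_gap then
    (segs, n, cur ++ [p.2])
  else if 3 < cur.length then (segs.insert n cur, n + 1, [p.2])
  else (segs, n, [p.2])

def break_segs_py (numbers : List Int) (max_gap : Int) : List (Int × List Int) :=
  let st := (PySem.List.enumerate numbers 0).foldl (breakStepA numbers max_gap)
    (PySem.Dict.empty, 0, [])
  (if 3 < st.2.2.length then st.1.insert st.2.1 st.2.2 else st.1).items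

-- ===== PORT B =====
-- the boundary list [0] + [i for i in range(1, n) if numbers[i] > numbers[i-1] + max_gap] + [n]
def cutsList (numbers : List Int) (max_gap : Int) : List Int :=
  [0] ++ ((PySem.List.pyRange 1 (numbers.length : Int) 1).filter (fun i =>
      (PySem.List.pyGet? numbers (i - 1)).getD 0 + max_gap < (PySem.List.pyGet? numbers i).getD 0))
    ++ [(numbers.length : Int)]

def break_segs_py_alt (numbers : List Int) (max_gap : Int) : List (Int × List Int) :=
  let cuts := cutsList numbers max_gap
  let segs := ((cuts.zip cuts.tail).filter (fun p => 3 < p.2 - p.1)).map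
    (fun p => PySem.List.slice numbers (some p.1) (some p.2))
  PySem.List.enumerate segs 0

-- ===== PRECONDITION & SPEC =====
def Spec_break_segs_py (numbers : List Int) (max_gap : Int) (out : List (Int × List Int)) : Prop := out = break_segs_py_alt numbers max_gap
instance (numbers : List Int) (max_gap : Int) (out : List (Int × List Int)) : Decidable (Spec_break_segs_py numbers max_gap out) := by unfold Spec_break_segs_py; infer_instance

-- ===== CLAIM (what is proved, stated in full; the proofs are below) =====
def Claim_equal_break_segs_py : Prop := ∀ (numbers : List Int) (max_gap : Int), Dom_break_segs_py numbers max_gap → Spec_break_segs_py numbers max_gap (break_segs_py numbers max_gap)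

-- ===== LEMMAS AND PROOFS =====

-- common intermediate: the maximal-run partition of the input, as a left fold
def stepR (g : Int) (st : List (List Int) × List Int) (x : Int) : List (List Int) × List Int :=
  if st.2 ≠ [] ∧ x ≤ st.2.getLastD 0 + g then (st.1, st.2 ++ [x])
  else ((if st.2 = [] then st.1 else st.1 ++ [st.2]), [x])

def bFinish (st : List (List Int) × List Int) : List (List Int) :=
  if st.2 = [] then st.1 else st.1 ++ [st.2]

-- A's loop with the previous element carried explicitly (only reached with cur ≠ [])
def loopA (g : Int) (st : PySem.Dict Int (List Int) × Int × List Int) (prev : Int) :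
    List Int → PySem.Dict Int (List Int) × Int × List Int
  | [] => st
  | x :: xs =>
    let (segs, n, cur) := st
    if x ≤ prev + g then loopA g (segs, n, cur ++ [x]) x xs
    else if 3 < cur.length then loopA g (segs.insert n cur, n + 1, [x]) x xs
    else loopA g (segs, n, [x]) x xs

-- A's final flush
def outA (st : PySem.Dict Int (List Int) × Int × List Int) : List (Int × List Int) :=
  (if 3 < st.2.2.length then st.1.insert st.2.1 st.2.2 else st.1).items

theorem pyGet_last_of_append (pre t : List Int) (h : pre ≠ []) :
    PySem.List.pyGet? (pre ++ t) ((pre.length : Int) - 1) = some (pre.getLastD 0) := by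
  have h1 : 0 < pre.length := List.length_pos_of_ne_nil h
  have : ((pre.length : Int) - 1) = ((pre.length - 1 : Nat) : Int) := by omega
  rw [this, PySem.List.pyGet?_natCast, List.getElem?_append_left (by omega)]
  rw [List.getLastD_eq_getLast?, List.getLast?_eq_getElem?]
  rw [List.getElem?_eq_getElem (by omega)]
  simp

theorem pyGet_append_left (xs ext : List Int) (i : Int) (h0 : 0 ≤ i) (h1 : i < (xs.length : Int)) :
    PySem.List.pyGet? (xs ++ ext) i = PySem.List.pyGet? xs i := by
  have hi : i = ((i.toNat : Nat) : Int) := (Int.toNat_of_nonneg h0).symm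
  rw [hi, PySem.List.pyGet?_natCast, PySem.List.pyGet?_natCast,
    List.getElem?_append_left (by omega)]

theorem pyGet_concat_self (xs : List Int) (z : Int) :
    PySem.List.pyGet? (xs ++ [z]) (xs.length : Int) = some z := by
  rw [PySem.List.pyGet?_natCast, List.getElem?_append_right (le_refl _)]
  simp

-- A's indexed fold equals the prev-carrying loop, for any nonempty already-read prefix
theorem foldA_eq (g : Int) : ∀ (xs pre : List Int)
    (st : PySem.Dict Int (List Int) × Int × List Int), pre ≠ [] → st.2.2 ≠ [] →
    (PySem.List.enumerate xs (pre.length : Int)).foldl (breakStepA (pre ++ xs) g) st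
      = loopA g st (pre.getLastD 0) xs := by
  intro xs
  induction xs with
  | nil => intro pre st _ _; simp [PySem.List.enumerate_nil, loopA]
  | cons x xs ih =>
    intro pre st hpre hcur
    obtain ⟨segs, n, cur⟩ := st
    simp only at hcur
    rw [PySem.List.enumerate_cons, List.foldl_cons]
    have hlook := pyGet_last_of_append pre (x :: xs) hpre
    simp only [breakStepA, loopA, if_neg hcur, hlook, Option.getD_some]
    have hlen : ((pre.length : Int) + 1) = (((pre ++ [x]).length : Nat) : Int) := by
      simp
    have happ : pre ++ x :: xs = (pre ++ [x]) ++ xs := by simp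
    have hlast : (pre ++ [x]).getLastD 0 = x := by simp
    split_ifs with h1 h2
    · rw [hlen, happ, ih (pre ++ [x]) (segs, n, cur ++ [x]) (by simp) (by simp), hlast]
    · rw [hlen, happ, ih (pre ++ [x]) (segs.insert n cur, n + 1, [x]) (by simp) (by simp), hlast]
    · rw [hlen, happ, ih (pre ++ [x]) (segs, n, [x]) (by simp) (by simp), hlast]

-- inserting at the next fresh key appends to the items list
theorem dict_mk_enum_insert (L : List (List Int)) (v : List Int) :
    ((PySem.Dict.mk (PySem.List.enumerate L 0)).insert (L.length : Int) v).items
      = PySem.List.enumerate L 0 ++ [((L.length : Int), v)] := by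
  rw [PySem.Dict.items_insert_of_not_contains]
  rw [PySem.Dict.contains_eq_decide_mem_keys]
  simp [PySem.Dict.keys, PySem.List.map_fst_enumerate, PySem.List.mem_pyRange_one]

theorem enum_append_singleton (L : List (List Int)) (v : List Int) :
    PySem.List.enumerate (L ++ [v]) 0 = PySem.List.enumerate L 0 ++ [((L.length : Int), v)] := by
  rw [PySem.List.enumerate_append]
  simp [PySem.List.enumerate_cons, PySem.List.enumerate_nil]

-- invariant: A's (dict, counter, cur) is the enumerate of the kept runs plus the shared cur
theorem main_eq (g : Int) : ∀ (xs cur : List Int) (runs : List (List Int)), cur ≠ [] →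
    outA (loopA g
        (PySem.Dict.mk (PySem.List.enumerate (runs.filter (fun r => 3 < r.length)) 0),
         (((runs.filter (fun r => 3 < r.length)).length : Nat) : Int), cur)
        (cur.getLastD 0) xs)
      = PySem.List.enumerate
          ((bFinish (xs.foldl (stepR g) (runs, cur))).filter (fun r => 3 < r.length)) 0 := by
  intro xs
  induction xs with
  | nil =>
    intro cur runs hcur
    simp only [loopA, outA, List.foldl_nil, bFinish, if_neg hcur]
    by_cases hp : 3 < cur.length
    · rw [if_pos hp, dict_mk_enum_insert, List.filter_append,
        show List.filter (fun r => decide (3 < r.length)) [cur] = [cur] by simp [hp],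
        enum_append_singleton]
    · rw [if_neg hp, List.filter_append,
        show List.filter (fun r => decide (3 < r.length)) [cur] = [] by simp [hp],
        List.append_nil]
  | cons x xs ih =>
    intro cur runs hcur
    rw [List.foldl_cons]
    simp only [stepR, loopA]
    by_cases hle : x ≤ cur.getLastD 0 + g
    · rw [if_pos hle, if_pos (⟨hcur, hle⟩ : cur ≠ [] ∧ x ≤ cur.getLastD 0 + g)]
      have := ih (cur ++ [x]) runs (by simp)
      simpa using this
    · rw [if_neg hle,
        if_neg (show ¬(cur ≠ [] ∧ x ≤ cur.getLastD 0 + g) from fun h => hle h.2),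
        if_neg hcur]
      by_cases hp : 3 < cur.length
      · rw [if_pos hp]
        have hd : (PySem.Dict.mk (PySem.List.enumerate (runs.filter (fun r => 3 < r.length)) 0)).insert
            (((runs.filter (fun r => 3 < r.length)).length : Nat) : Int) cur
            = PySem.Dict.mk (PySem.List.enumerate ((runs ++ [cur]).filter (fun r => 3 < r.length)) 0) := by
          apply PySem.Dict.ext
          rw [dict_mk_enum_insert, List.filter_append,
            show List.filter (fun r => decide (3 < r.length)) [cur] = [cur] by simp [hp],
            enum_append_singleton]
        have hn : (((runs.filter (fun r => 3 < r.length)).length : Nat) : Int) + 1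
            = ((((runs ++ [cur]).filter (fun r => 3 < r.length)).length : Nat) : Int) := by
          rw [List.filter_append]
          simp [hp]
        rw [hd, hn]
        have := ih [x] (runs ++ [cur]) (by simp)
        simpa using this
      · rw [if_neg hp]
        have hf : (runs ++ [cur]).filter (fun r => 3 < r.length)
            = runs.filter (fun r => 3 < r.length) := by
          rw [List.filter_append]; simp [hp]
        have := ih [x] (runs ++ [cur]) (by simp)
        rw [hf] at this
        simpa using this

-- A computes: enumerate the long runs of the maximal-run partition
theorem A_char (numbers : List Int) (g : Int) :
    break_segs_py numbers g
      = PySem.List.enumerate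
          ((bFinish (numbers.foldl (stepR g) ([], []))).filter (fun r => 3 < r.length)) 0 := by
  cases numbers with
  | nil => rfl
  | cons x rest =>
    rw [show (x :: rest).foldl (stepR g) ([], []) = rest.foldl (stepR g) ([], [x]) by
      rw [List.foldl_cons]; rfl]
    simp only [break_segs_py]
    rw [PySem.List.enumerate_cons, List.foldl_cons]
    have h1 : breakStepA (x :: rest) g (PySem.Dict.empty, 0, ([] : List Int)) (0, x)
        = (PySem.Dict.empty, 0, [x]) := by
      simp [breakStepA]
    rw [h1]
    have h3 : (0 : Int) + 1 = (([x].length : Nat) : Int) := by simp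
    rw [h3, show (x :: rest) = [x] ++ rest from rfl,
      foldA_eq g rest [x] (PySem.Dict.empty, 0, [x]) (by simp) (by simp)]
    have := main_eq g rest [x] [] (by simp)
    simp only [List.filter_nil, PySem.List.enumerate_nil, List.length_nil, Nat.cast_zero] at this
    simpa [outA] using this

-- cumulative cut positions of a partition
def positions (a : Int) : List (List Int) → List Int
  | [] => [a]
  | r :: rs => a :: positions (a + (r.length : Int)) rs

theorem pos_append (r : List Int) : ∀ (rs : List (List Int)) (a : Int),
    positions a (rs ++ [r])
      = positions a rs ++ [a + (rs.flatten.length : Int) + (r.length : Int)] := by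
  intro rs
  induction rs with
  | nil => intro a; simp [positions]
  | cons r0 rs ih =>
    intro a
    show a :: positions (a + (r0.length : Int)) (rs ++ [r]) = _
    rw [ih]
    simp only [positions, List.flatten_cons, List.length_append, List.cons_append,
      List.cons.injEq, List.append_cancel_left_eq, true_and]
    constructor
    · push_cast; ring
    · trivial

theorem positions_cons_head (a : Int) (rs : List (List Int)) :
    ∃ t, positions a rs = a :: t := by
  cases rs <;> exact ⟨_, rfl⟩

-- invariant of the run-building fold: the cut list of ys is exactly the cumulative
-- positions of the partition built so far
theorem inv_fold (g : Int) : ∀ (ys : List Int), ys ≠ [] →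
    (ys.foldl (stepR g) ([], [])).2 ≠ [] ∧
    (ys.foldl (stepR g) ([], [])).2.getLastD 0 = ys.getLastD 0 ∧
    ((ys.foldl (stepR g) ([], [])).1 ++ [(ys.foldl (stepR g) ([], [])).2]).flatten = ys ∧
    cutsList ys g
      = positions 0 ((ys.foldl (stepR g) ([], [])).1 ++ [(ys.foldl (stepR g) ([], [])).2]) := by
  intro ys
  induction ys using List.reverseRecOn with
  | nil => intro h; exact absurd rfl h
  | append_singleton ys z ih =>
    intro _
    by_cases hys : ys = []
    · subst hys
      have hst : ([] ++ [z]).foldl (stepR g) ([], []) = (([] : List (List Int)), [z]) := by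
        simp [stepR]
      rw [hst]
      refine ⟨by simp, by simp, by simp, ?_⟩
      have h0 : (((([] : List Int) ++ [z]).length : Nat) : Int) = 1 := by simp
      simp only [cutsList, h0, PySem.List.pyRange_one_eq_nil (le_refl (1 : Int)),
        List.filter_nil]
      show ([0, 1] : List Int) = positions 0 [[z]]
      norm_num [positions]
    · obtain ⟨h1, h2, h3, h5⟩ := ih hys
      rcases hE : ys.foldl (stepR g) ([], []) with ⟨runs, cur⟩
      rw [hE] at h1 h2 h3 h5
      simp only at h1 h2 h3 h5
      have hfold : (ys ++ [z]).foldl (stepR g) ([], []) = stepR g (runs, cur) z := by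
        rw [List.foldl_append, hE]; rfl
      have hlenpos : 0 < ys.length := List.length_pos_of_ne_nil hys
      -- the cut list of ys ++ [z], decomposed at the new index
      have hrange : PySem.List.pyRange 1 (((ys ++ [z]).length : Nat) : Int) 1
          = PySem.List.pyRange 1 ((ys.length : Nat) : Int) 1 ++ [((ys.length : Nat) : Int)] := by
        have hl : (((ys ++ [z]).length : Nat) : Int) = ((ys.length : Nat) : Int) + 1 := by
          simp
        rw [hl, PySem.List.pyRange_one_succ_right (by exact_mod_cast hlenpos)]
      have hcongr : (PySem.List.pyRange 1 ((ys.length : Nat) : Int) 1).filter (fun i =>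
            (PySem.List.pyGet? (ys ++ [z]) (i - 1)).getD 0 + g
              < (PySem.List.pyGet? (ys ++ [z]) i).getD 0)
          = (PySem.List.pyRange 1 ((ys.length : Nat) : Int) 1).filter (fun i =>
            (PySem.List.pyGet? ys (i - 1)).getD 0 + g < (PySem.List.pyGet? ys i).getD 0) := by
        apply List.filter_congr
        intro i hi
        rw [PySem.List.mem_pyRange_one] at hi
        rw [pyGet_append_left ys [z] i (by omega) hi.2,
          pyGet_append_left ys [z] (i - 1) (by omega) (by omega)]
      have hlastget := pyGet_last_of_append ys [z] hys
      have hselfget := pyGet_concat_self ys z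
      have hcuts : cutsList (ys ++ [z]) g
          = ([0] ++ (PySem.List.pyRange 1 ((ys.length : Nat) : Int) 1).filter (fun i =>
                (PySem.List.pyGet? ys (i - 1)).getD 0 + g < (PySem.List.pyGet? ys i).getD 0)
              ++ (if ys.getLastD 0 + g < z then [((ys.length : Nat) : Int)] else []))
            ++ [((ys.length : Nat) : Int) + 1] := by
        simp only [cutsList, hrange, List.filter_append, hcongr, List.filter_cons,
          List.filter_nil, hlastget, hselfget, Option.getD_some]
        have hl : (((ys ++ [z]).length : Nat) : Int) = ((ys.length : Nat) : Int) + 1 := by simp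
        rw [hl]
        by_cases hc : ys.getLastD 0 + g < z
        · simp [List.append_assoc]
        · simp [List.append_assoc]
      have hflat3 : runs.flatten ++ cur = ys := by
        have h := h3
        rwa [List.flatten_append, List.flatten_cons, List.flatten_nil, List.append_nil] at h
      have hflatlen : (runs.flatten.length : Int) + (cur.length : Int)
          = ((ys.length : Nat) : Int) := by
        rw [← hflat3]
        push_cast [List.length_append]
        ring
      have h5' : cutsList ys g
          = positions 0 runs ++ [0 + (runs.flatten.length : Int) + (cur.length : Int)] := by
        rw [h5, pos_append]
      have h5'' : ([0] ++ (PySem.List.pyRange 1 ((ys.length : Nat) : Int) 1).filter (fun i =>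
              (PySem.List.pyGet? ys (i - 1)).getD 0 + g < (PySem.List.pyGet? ys i).getD 0))
            ++ [((ys.length : Nat) : Int)] = positions 0 runs
              ++ [0 + (runs.flatten.length : Int) + (cur.length : Int)] := by
        rw [← h5']
        simp [cutsList]
      obtain ⟨hinit, -⟩ := List.append_inj' h5'' rfl
      by_cases hle : z ≤ cur.getLastD 0 + g
      · -- extend the current run
        have hstep : stepR g (runs, cur) z = (runs, cur ++ [z]) := by
          simp only [stepR]
          rw [if_pos ⟨h1, hle⟩]
        rw [hfold, hstep]
        refine ⟨by simp, by simp, ?_, ?_⟩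
        · have : (runs ++ [cur ++ [z]]).flatten = (runs ++ [cur]).flatten ++ [z] := by
            simp [List.flatten_append, List.append_assoc]
          rw [this, h3]
        · have hnc : ¬ (ys.getLastD 0 + g < z) := by rw [← h2]; omega
          rw [hcuts, if_neg hnc, List.append_nil, pos_append, hinit]
          congr 2
          simp only [List.length_append, List.length_cons, List.length_nil]
          have : (0 : Int) + (runs.flatten.length : Int) + (cur.length : Int)
              = ((ys.length : Nat) : Int) := by omega
          push_cast
          omega
      · -- close the current run, start a new one
        have hstep : stepR g (runs, cur) z = (runs ++ [cur], [z]) := by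
          simp only [stepR]
          rw [if_neg (fun h => hle h.2), if_neg h1]
        rw [hfold, hstep]
        refine ⟨by simp, by simp, ?_, ?_⟩
        · have : ((runs ++ [cur]) ++ [[z]]).flatten = (runs ++ [cur]).flatten ++ [z] := by
            simp [List.flatten_append]
          rw [this, h3]
        · have hc : ys.getLastD 0 + g < z := by rw [← h2]; omega
          have hfl : (((runs ++ [cur]).flatten.length : Nat) : Int)
              = ((ys.length : Nat) : Int) := by rw [h3]
          rw [hcuts, if_pos hc, pos_append (r := [z]),
            show (([0] ++ (PySem.List.pyRange 1 ((ys.length : Nat) : Int) 1).filter (fun i =>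
                (PySem.List.pyGet? ys (i - 1)).getD 0 + g < (PySem.List.pyGet? ys i).getD 0)
              ++ [((ys.length : Nat) : Int)]) : List Int) = cutsList ys g from by
                simp [cutsList], h5]
          congr 2
          rw [hfl]
          simp

-- slicing the flattened partition between consecutive cumulative positions recovers it
theorem slices_of_partition : ∀ (rs : List (List Int)) (pre full : List Int),
    full = pre ++ rs.flatten →
    ((((positions ((pre.length : Nat) : Int) rs).zip
          (positions ((pre.length : Nat) : Int) rs).tail).filter
        (fun p => 3 < p.2 - p.1)).map
      (fun p => PySem.List.slice full (some p.1) (some p.2)))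
      = rs.filter (fun r => 3 < r.length) := by
  intro rs
  induction rs with
  | nil => intro pre full h; simp [positions]
  | cons r rs ih =>
    intro pre full h
    have hcast : ((pre.length : Nat) : Int) + (r.length : Int) = (((pre ++ r).length : Nat) : Int) := by
      simp
    obtain ⟨t, ht⟩ := positions_cons_head (((pre ++ r).length : Nat) : Int) rs
    have hpos : positions ((pre.length : Nat) : Int) (r :: rs)
        = ((pre.length : Nat) : Int) :: positions (((pre ++ r).length : Nat) : Int) rs := by
      simp only [positions, hcast]
    rw [hpos, ht]
    simp only [List.tail_cons, List.zip_cons_cons, List.filter_cons]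
    have hslice : PySem.List.slice full (some ((pre.length : Nat) : Int))
        (some (((pre ++ r).length : Nat) : Int)) = r := by
      rw [h, List.flatten_cons, ← hcast, PySem.List.slice_natCast_add,
        List.drop_left, List.take_left]
    have hcond : (3 < (((pre ++ r).length : Nat) : Int) - ((pre.length : Nat) : Int))
        ↔ 3 < r.length := by
      push_cast [List.length_append]
      omega
    have hrest := ih (pre ++ r) full (by rw [h, List.flatten_cons, List.append_assoc])
    rw [ht] at hrest
    simp only [List.tail_cons] at hrest
    have hdec : decide (3 < (((pre ++ r).length : Nat) : Int) - ((pre.length : Nat) : Int))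
        = decide (3 < r.length) := decide_eq_decide.mpr hcond
    simp only [hdec]
    by_cases hr : 3 < r.length
    · simp only [if_pos (show decide (3 < r.length) = true by simpa using hr),
        List.map_cons, hslice, hrest]
    · simp only [if_neg (show ¬ decide (3 < r.length) = true by simpa using hr), hrest]

-- B computes the same enumerate of the long runs
theorem B_char (numbers : List Int) (g : Int) (h : numbers ≠ []) :
    break_segs_py_alt numbers g
      = PySem.List.enumerate
          ((bFinish (numbers.foldl (stepR g) ([], []))).filter (fun r => 3 < r.length)) 0 := by
  obtain ⟨h1, _, h3, h5⟩ := inv_fold g numbers h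
  rcases hE : numbers.foldl (stepR g) ([], []) with ⟨runs, cur⟩
  rw [hE] at h1 h3 h5
  simp only at h1 h3 h5
  have hfin : bFinish (runs, cur) = runs ++ [cur] := by
    simp [bFinish, h1]
  have hsl := slices_of_partition (runs ++ [cur]) [] numbers (by simpa using h3.symm)
  simp only [List.length_nil, Nat.cast_zero] at hsl
  simp only [break_segs_py_alt, h5, hfin, hsl]

-- ===== VERDICT (by name: the statement is the Claim_ definition above) =====
theorem break_segs_py_spec : Claim_equal_break_segs_py := by
  intro numbers g _
  unfold Spec_break_segs_py
  cases numbers with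
  | nil => rfl
  | cons x rest =>
    rw [A_char (x :: rest) g, B_char (x :: rest) g (by simp)]
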